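-- pv_equiv track=rewrite | github.com/CAG2Mark/aoc-2024 | day04/p1.py | create_all
-- ===== SOURCE A (Python) =====
-- def create(board, r, c, diffs):
--     ROWS = len(board)
--     COLS = len(board[0])
--     s = ""
--     while 0 <= r < ROWS and 0 <= c < COLS:
--         s += board[r][c]
--         r += diffs[0]
--         c += diffs[1]
--     return s
--
-- def create_all(board):
--     ROWS = len(board)
--     COLS = len(board[0])
--
--     strs = []
--
--     # horizontal
--     for i in range(ROWS):
--         strs.append(create(board, i, 0, [0, 1]))
--     for i in range(COLS):
--         strs.append(create(board, 0, i, [1, 0]))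
--     # diag \
--     for i in range(ROWS):
--         strs.append(create(board, i, 0, [1, 1]))
--     for i in range(1, COLS):
--         strs.append(create(board, 0, i, [1, 1]))
--     # diag /
--     for i in range(COLS):
--         strs.append(create(board, 0, i, [1, -1]))
--     for i in range(1, ROWS):
--         strs.append(create(board, i, COLS - 1, [1, -1]))
--
--     return strs
-- ===== SOURCE B (Python) =====
-- def create_all(board):
--     ROWS = len(board)
--     COLS = len(board[0])
--     rows = [''.join(board[r][c] for c in range(COLS)) for r in range(ROWS)]
--     cols = [''.join(board[r][c] for r in range(ROWS)) for c in range(COLS)]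
--     cells = [(r, c, board[r][c]) for r in range(ROWS) for c in range(COLS)]
--     d1 = {}
--     d2 = {}
--     for (r, c, ch) in cells:
--         d1[r - c] = d1.get(r - c, []) + [ch]
--         d2[r + c] = d2.get(r + c, []) + [ch]
--     keys1 = list(range(ROWS)) + list(range(-1, -COLS, -1))
--     diag1 = [''.join(d1.get(k, [])) for k in keys1]
--     diag2 = [''.join(d2.get(k, [])) for k in range(ROWS + COLS - 1)]
--     return rows + cols + diag1 + diag2
-- ===== Notes on version B (the rewrite author's own statement) =====
-- stated objective: alternative
-- what changed: Replaces the generic directional-walk helper (a while loop with per-step bound checks, restarted from every border cell) by one row-major pass that drops each character into dict buckets keyed by r-c and r+c, plus direct indexed comprehensions for rows and columns; the output is assembled by joining the buckets in the walk's key order.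
import Mathlib
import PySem

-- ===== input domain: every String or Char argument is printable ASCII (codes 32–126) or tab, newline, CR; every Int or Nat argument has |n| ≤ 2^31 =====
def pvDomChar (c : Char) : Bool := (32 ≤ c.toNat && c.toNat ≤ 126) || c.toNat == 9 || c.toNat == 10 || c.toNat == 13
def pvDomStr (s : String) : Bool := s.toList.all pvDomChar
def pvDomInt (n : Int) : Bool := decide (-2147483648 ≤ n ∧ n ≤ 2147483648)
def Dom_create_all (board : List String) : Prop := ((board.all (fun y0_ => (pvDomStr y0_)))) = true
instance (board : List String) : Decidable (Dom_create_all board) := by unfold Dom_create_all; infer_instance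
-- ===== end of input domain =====

-- B replaces A's directional-walk helper by one row-major pass into diagonal buckets (alternative
-- decomposition, same asymptotic cost); equal return values proved on Pre_ (A raises elsewhere).

-- ===== PORT A =====
-- the while loop of `create`; fuel makes it total (for the diffs A uses, [0,1]/[1,0]/[1,±1],
-- the walk takes at most ROWS+COLS steps, so the fuel below is never exhausted)
def createGo (board : List String) (ROWS COLS dr dc : Int) : Nat → Int → Int → List Char
  | 0, _, _ => []
  | fuel + 1, r, c =>
    if 0 ≤ r ∧ r < ROWS ∧ 0 ≤ c ∧ c < COLS then
      match PySem.Str.pyGet? ((PySem.List.pyGet? board r).getD "") c with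
      | some ch => ch :: createGo board ROWS COLS dr dc fuel (r + dr) (c + dc)
      | none => []      -- IndexError on a ragged row; excluded by Pre_
    else []

def create (board : List String) (r c : Int) (diffs : List Int) : String :=
  let ROWS : Int := board.length
  let COLS : Int := PySem.Str.len ((PySem.List.pyGet? board 0).getD "")   -- len(board[0]); [] raises, excluded by Pre_
  String.ofList (createGo board ROWS COLS (PySem.List.pyGetD diffs 0 0) (PySem.List.pyGetD diffs 1 0)
    (ROWS.toNat + COLS.toNat + 1) r c)

def create_all (board : List String) : List String :=
  let ROWS : Int := board.length
  let COLS : Int := PySem.Str.len ((PySem.List.pyGet? board 0).getD "")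
  let strs : List String := []
  let strs := (PySem.List.pyRange 0 ROWS 1).foldl (fun acc i => acc ++ [create board i 0 [0, 1]]) strs
  let strs := (PySem.List.pyRange 0 COLS 1).foldl (fun acc i => acc ++ [create board 0 i [1, 0]]) strs
  let strs := (PySem.List.pyRange 0 ROWS 1).foldl (fun acc i => acc ++ [create board i 0 [1, 1]]) strs
  let strs := (PySem.List.pyRange 1 COLS 1).foldl (fun acc i => acc ++ [create board 0 i [1, 1]]) strs
  let strs := (PySem.List.pyRange 0 COLS 1).foldl (fun acc i => acc ++ [create board 0 i [1, -1]]) strs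
  let strs := (PySem.List.pyRange 1 ROWS 1).foldl (fun acc i => acc ++ [create board i (COLS - 1) [1, -1]]) strs
  strs

-- ===== PORT B =====
-- board[r][c] (in-bounds whenever Pre_ holds and 0 ≤ r < ROWS, 0 ≤ c < COLS; the default is never hit there)
def bCell (board : List String) (r c : Int) : Char :=
  (PySem.Str.pyGet? ((PySem.List.pyGet? board r).getD "") c).getD ' '

def create_all_alt (board : List String) : List String :=
  let ROWS : Int := board.length
  let COLS : Int := PySem.Str.len ((PySem.List.pyGet? board 0).getD "")
  let rows := (PySem.List.pyRange 0 ROWS 1).map (fun r =>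
    String.ofList ((PySem.List.pyRange 0 COLS 1).map (fun c => bCell board r c)))
  let cols := (PySem.List.pyRange 0 COLS 1).map (fun c =>
    String.ofList ((PySem.List.pyRange 0 ROWS 1).map (fun r => bCell board r c)))
  let cells := (PySem.List.pyRange 0 ROWS 1).flatMap (fun r =>
    (PySem.List.pyRange 0 COLS 1).map (fun c => (r, c, bCell board r c)))
  let dd := cells.foldl (fun dd x =>
      (dd.1.modify (x.1 - x.2.1) [] (· ++ [x.2.2]), dd.2.modify (x.1 + x.2.1) [] (· ++ [x.2.2])))
    ((PySem.Dict.empty : PySem.Dict Int (List Char)), (PySem.Dict.empty : PySem.Dict Int (List Char)))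
  let keys1 := PySem.List.pyRange 0 ROWS 1 ++ PySem.List.pyRange (-1) (-COLS) (-1)
  let diag1 := keys1.map (fun k => String.ofList (dd.1.getD k []))
  let diag2 := (PySem.List.pyRange 0 (ROWS + COLS - 1) 1).map (fun k => String.ofList (dd.2.getD k []))
  rows ++ cols ++ diag1 ++ diag2

-- ===== PRECONDITION & SPEC =====
-- Pre_ excludes exactly the inputs where A raises IndexError: the empty board (board[0])
-- and boards with a row shorter than the first row (board[r][c] inside the walk).
def Pre_create_all (board : List String) : Prop :=
  board ≠ [] ∧ ∀ s ∈ board, PySem.Str.len (board.headD "") ≤ PySem.Str.len s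
instance (board : List String) : Decidable (Pre_create_all board) := by unfold Pre_create_all; infer_instance

def pvWitness_create_all : List String := ["ab", "cd"]

def Spec_create_all (board : List String) (out : List String) : Prop := out = create_all_alt board
instance (board : List String) (out : List String) : Decidable (Spec_create_all board out) := by unfold Spec_create_all; infer_instance

-- ===== CLAIM (what is proved, stated in full; the proofs are below) =====
def Claim_equal_create_all : Prop := ∀ (board : List String), Dom_create_all board → Pre_create_all board → Spec_create_all board (create_all board)

-- ===== LEMMAS AND PROOFS =====


-- board[r][c] is `some (bCell board r c)` whenever the indices are in bounds and row r is long enough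
lemma cell_some (board : List String) (C r c : Int)
    (hrow : ∀ s ∈ board, C ≤ (s.toList.length : Int))
    (hr0 : 0 ≤ r) (hr : r < (board.length : Int)) (hc0 : 0 ≤ c) (hc : c < C) :
    PySem.Str.pyGet? ((PySem.List.pyGet? board r).getD "") c = some (bCell board r c) := by
  have hrn : r.toNat < board.length := by omega
  simp only [bCell]
  rw [PySem.List.pyGet?_eq_some_getElem board hr0 (by exact_mod_cast hr)]
  set s := board[r.toNat] with hsdef
  have hs : C ≤ (s.toList.length : Int) := hrow s (by exact List.getElem_mem hrn)
  have h2 : PySem.Str.pyGet? s c = some s.toList[c.toNat] := by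
    simp only [PySem.Str.pyGet?, PySem.Chars.pyGet?_eq_listPyGet?]
    exact PySem.List.pyGet?_eq_some_getElem s.toList hc0 (by omega)
  simp only [Option.getD_some, h2]

-- walk characterisations of createGo, one per direction A uses
lemma walk01 (board : List String) (C : Int)
    (hrow : ∀ s ∈ board, C ≤ (s.toList.length : Int))
    (r : Int) (hr0 : 0 ≤ r) (hr : r < (board.length : Int)) :
    ∀ (fuel : Nat) (c : Int), 0 ≤ c → (C - c).toNat ≤ fuel →
      createGo board (board.length : Int) C 0 1 fuel r c
        = (PySem.List.pyRange c C 1).map (fun cc => bCell board r cc) := by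
  intro fuel
  induction fuel with
  | zero =>
    intro c hc0 hf
    rw [PySem.List.pyRange_one_eq_nil (by omega)]
    simp [createGo]
  | succ n ih =>
    intro c hc0 hf
    by_cases hcC : c < C
    · rw [createGo, if_pos ⟨hr0, hr, hc0, hcC⟩,
        cell_some board C r c hrow hr0 hr hc0 hcC,
        PySem.List.pyRange_one_cons (by omega)]
      simp only [List.map_cons, add_zero]
      rw [ih (c + 1) (by omega) (by omega)]
    · rw [createGo, if_neg (by omega), PySem.List.pyRange_one_eq_nil (by omega)]
      simp

lemma walk10 (board : List String) (C : Int)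
    (hrow : ∀ s ∈ board, C ≤ (s.toList.length : Int))
    (c : Int) (hc0 : 0 ≤ c) (hc : c < C) :
    ∀ (fuel : Nat) (r : Int), 0 ≤ r → ((board.length : Int) - r).toNat ≤ fuel →
      createGo board (board.length : Int) C 1 0 fuel r c
        = (PySem.List.pyRange r (board.length : Int) 1).map (fun rr => bCell board rr c) := by
  intro fuel
  induction fuel with
  | zero =>
    intro r hr0 hf
    rw [PySem.List.pyRange_one_eq_nil (by omega)]
    simp [createGo]
  | succ n ih =>
    intro r hr0 hf
    by_cases hrR : r < (board.length : Int)
    · rw [createGo, if_pos ⟨hr0, hrR, hc0, hc⟩,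
        cell_some board C r c hrow hr0 hrR hc0 hc,
        PySem.List.pyRange_one_cons (by omega)]
      simp only [List.map_cons, add_zero]
      rw [ih (r + 1) (by omega) (by omega)]
    · rw [createGo, if_neg (by omega), PySem.List.pyRange_one_eq_nil (by omega)]
      simp

lemma walk11 (board : List String) (C : Int)
    (hrow : ∀ s ∈ board, C ≤ (s.toList.length : Int)) (k : Int) :
    ∀ (fuel : Nat) (r : Int), 0 ≤ r → 0 ≤ r - k → ((board.length : Int) - r).toNat ≤ fuel →
      createGo board (board.length : Int) C 1 1 fuel r (r - k)
        = (PySem.List.pyRange r (min (board.length : Int) (k + C)) 1).map (fun rr => bCell board rr (rr - k)) := by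
  intro fuel
  induction fuel with
  | zero =>
    intro r hr0 hrk hf
    rw [PySem.List.pyRange_one_eq_nil (by omega)]
    simp [createGo]
  | succ n ih =>
    intro r hr0 hrk hf
    by_cases hin : r < (board.length : Int) ∧ r - k < C
    · rw [createGo, if_pos ⟨hr0, hin.1, hrk, hin.2⟩,
        cell_some board C r (r - k) hrow hr0 hin.1 hrk hin.2,
        PySem.List.pyRange_one_cons (by omega)]
      simp only [List.map_cons]
      have h1 : r - k + 1 = (r + 1) - k := by ring
      rw [h1, ih (r + 1) (by omega) (by omega) (by omega)]
    · rw [createGo, if_neg (by omega), PySem.List.pyRange_one_eq_nil (by omega)]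
      simp

lemma walk1m1 (board : List String) (C : Int)
    (hrow : ∀ s ∈ board, C ≤ (s.toList.length : Int)) (k : Int) :
    ∀ (fuel : Nat) (r : Int), 0 ≤ r → k - r < C → ((board.length : Int) - r).toNat ≤ fuel →
      createGo board (board.length : Int) C 1 (-1) fuel r (k - r)
        = (PySem.List.pyRange r (min (board.length : Int) (k + 1)) 1).map (fun rr => bCell board rr (k - rr)) := by
  intro fuel
  induction fuel with
  | zero =>
    intro r hr0 hkr hf
    rw [PySem.List.pyRange_one_eq_nil (by omega)]
    simp [createGo]
  | succ n ih =>
    intro r hr0 hkr hf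
    by_cases hin : r < (board.length : Int) ∧ 0 ≤ k - r
    · rw [createGo, if_pos ⟨hr0, hin.1, hin.2, hkr⟩,
        cell_some board C r (k - r) hrow hr0 hin.1 hin.2 hkr,
        PySem.List.pyRange_one_cons (by omega)]
      simp only [List.map_cons]
      have h1 : k - r + -1 = k - (r + 1) := by ring
      rw [h1, ih (r + 1) (by omega) (by omega) (by omega)]
    · rw [createGo, if_neg (by omega), PySem.List.pyRange_one_eq_nil (by omega)]
      simp

-- a pyRange filtered by equality with a single value
lemma pyRange_filter_single (b t : Int) (p : Int → Bool) (hp : ∀ c, p c = true ↔ c = t) :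
    ∀ (a : Int), (PySem.List.pyRange a b 1).filter p = if a ≤ t ∧ t < b then [t] else [] := by
  suffices h : ∀ (n : Nat) (a : Int), (b - a).toNat = n →
      (PySem.List.pyRange a b 1).filter p = if a ≤ t ∧ t < b then [t] else [] by
    intro a; exact h _ a rfl
  intro n
  induction n with
  | zero =>
    intro a ha
    rw [PySem.List.pyRange_one_eq_nil (by omega), if_neg (show ¬(a ≤ t ∧ t < b) by omega)]
    rfl
  | succ n ih =>
    intro a ha
    rw [PySem.List.pyRange_one_cons (by omega), List.filter_cons]
    by_cases hpa : a = t
    · have hpt : p a = true := (hp a).mpr hpa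
      rw [hpt, ih (a + 1) (by omega)]
      rw [if_neg (show ¬(a + 1 ≤ t ∧ t < b) by omega), if_pos (show a ≤ t ∧ t < b by omega)]
      simp [hpa]
    · have hpt : p a = false := by
        cases hpv : p a with
        | true => exact absurd ((hp a).mp hpv) hpa
        | false => rfl
      rw [hpt, ih (a + 1) (by omega)]
      simp only [Bool.false_eq_true, if_false]
      by_cases hcond : a + 1 ≤ t ∧ t < b
      · rw [if_pos hcond, if_pos (show a ≤ t ∧ t < b by omega)]
      · rw [if_neg hcond, if_neg (show ¬(a ≤ t ∧ t < b) by omega)]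

-- flatMap of an interval-guarded singleton over a pyRange is a map over the clipped subrange
lemma flatMap_if_singleton {α : Type} (b lo hi : Int) (f : Int → α) :
    ∀ (a : Int), (PySem.List.pyRange a b 1).flatMap (fun r => if lo ≤ r ∧ r < hi then [f r] else [])
      = (PySem.List.pyRange (max a lo) (min b hi) 1).map f := by
  suffices h : ∀ (n : Nat) (a : Int), (b - a).toNat = n →
      (PySem.List.pyRange a b 1).flatMap (fun r => if lo ≤ r ∧ r < hi then [f r] else [])
        = (PySem.List.pyRange (max a lo) (min b hi) 1).map f by
    intro a; exact h _ a rfl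
  intro n
  induction n with
  | zero =>
    intro a ha
    rw [PySem.List.pyRange_one_eq_nil (b := b) (by omega),
      PySem.List.pyRange_one_eq_nil (by omega)]
    rfl
  | succ n ih =>
    intro a ha
    rw [PySem.List.pyRange_one_cons (by omega), List.flatMap_cons, ih (a + 1) (by omega)]
    by_cases hin : lo ≤ a ∧ a < hi
    · rw [if_pos hin, show max a lo = a by omega, show max (a + 1) lo = a + 1 by omega,
        PySem.List.pyRange_one_cons (a := a) (b := min b hi) (by omega)]
      simp
    · rw [if_neg hin]
      by_cases hlo : a < lo
      · rw [show max (a + 1) lo = max a lo by omega]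
        simp
      · rw [PySem.List.pyRange_one_eq_nil (a := max (a + 1) lo) (by omega),
          PySem.List.pyRange_one_eq_nil (a := max a lo) (by omega)]
        simp

-- B's row-major cell list, as a function of the board
def cellsOf (R C : Int) (g : Int → Int → Char) : List (Int × Int × Char) :=
  (PySem.List.pyRange 0 R 1).flatMap (fun r => (PySem.List.pyRange 0 C 1).map (fun c => (r, c, g r c)))

-- the r-c bucket of B's dict holds exactly the \-diagonal of key k, top to bottom
lemma bucket1 (R C k : Int) (g : Int → Int → Char) :
    (((cellsOf R C g).foldl (fun d x => d.modify (x.1 - x.2.1) [] (· ++ [x.2.2])) PySem.Dict.empty).getD k [])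
      = (PySem.List.pyRange (max 0 k) (min R (k + C)) 1).map (fun r => g r (r - k)) := by
  have h1 : (cellsOf R C g).foldl (fun d x => d.modify (x.1 - x.2.1) [] (· ++ [x.2.2])) PySem.Dict.empty
      = ((cellsOf R C g).map (fun x => (x.1 - x.2.1, x.2.2))).foldl
          (fun d p => d.modify p.1 [] (· ++ [p.2])) PySem.Dict.empty := by
    rw [List.foldl_map]
  rw [h1, PySem.Dict.getD_foldl_modify_append]
  simp only [PySem.Dict.getD_empty, List.nil_append, List.filter_map, List.map_map]
  have h2 : ((cellsOf R C g).filter ((fun p => p.1 == k) ∘ (fun x => (x.1 - x.2.1, x.2.2)))).map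
      ((fun p : Int × Char => p.2) ∘ (fun x : Int × Int × Char => (x.1 - x.2.1, x.2.2)))
      = ((cellsOf R C g).filter (fun x => x.1 - x.2.1 == k)).map (fun x => x.2.2) := rfl
  rw [h2]
  unfold cellsOf
  rw [List.filter_flatMap, List.map_flatMap]
  have hinner : ∀ r : Int,
      ((((PySem.List.pyRange 0 C 1).map (fun c => (r, c, g r c))).filter (fun x => x.1 - x.2.1 == k)).map
        (fun x => x.2.2))
      = if k ≤ r ∧ r < k + C then [(fun rr => g rr (rr - k)) r] else [] := by
    intro r
    rw [List.filter_map, List.map_map]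
    have hc : ((fun x : Int × Int × Char => x.1 - x.2.1 == k) ∘ (fun c => (r, c, g r c))) = fun c : Int => r - c == k := rfl
    rw [hc, pyRange_filter_single C (r - k) _ (by intro c; simp only [beq_iff_eq]; omega) 0]
    by_cases h : 0 ≤ r - k ∧ r - k < C
    · rw [if_pos h, if_pos (show k ≤ r ∧ r < k + C by omega)]
      simp
    · rw [if_neg h, if_neg (show ¬(k ≤ r ∧ r < k + C) by omega)]
      simp
  simp only [hinner]
  rw [flatMap_if_singleton R k (k + C) (fun rr => g rr (rr - k)) 0]

-- the r+c bucket of B's dict holds exactly the /-diagonal of key k, top to bottom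
lemma bucket2 (R C k : Int) (g : Int → Int → Char) :
    (((cellsOf R C g).foldl (fun d x => d.modify (x.1 + x.2.1) [] (· ++ [x.2.2])) PySem.Dict.empty).getD k [])
      = (PySem.List.pyRange (max 0 (k - C + 1)) (min R (k + 1)) 1).map (fun r => g r (k - r)) := by
  have h1 : (cellsOf R C g).foldl (fun d x => d.modify (x.1 + x.2.1) [] (· ++ [x.2.2])) PySem.Dict.empty
      = ((cellsOf R C g).map (fun x => (x.1 + x.2.1, x.2.2))).foldl
          (fun d p => d.modify p.1 [] (· ++ [p.2])) PySem.Dict.empty := by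
    rw [List.foldl_map]
  rw [h1, PySem.Dict.getD_foldl_modify_append]
  simp only [PySem.Dict.getD_empty, List.nil_append, List.filter_map, List.map_map]
  have h2 : ((cellsOf R C g).filter ((fun p => p.1 == k) ∘ (fun x => (x.1 + x.2.1, x.2.2)))).map
      ((fun p : Int × Char => p.2) ∘ (fun x : Int × Int × Char => (x.1 + x.2.1, x.2.2)))
      = ((cellsOf R C g).filter (fun x => x.1 + x.2.1 == k)).map (fun x => x.2.2) := rfl
  rw [h2]
  unfold cellsOf
  rw [List.filter_flatMap, List.map_flatMap]
  have hinner : ∀ r : Int,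
      ((((PySem.List.pyRange 0 C 1).map (fun c => (r, c, g r c))).filter (fun x => x.1 + x.2.1 == k)).map
        (fun x => x.2.2))
      = if k - C + 1 ≤ r ∧ r < k + 1 then [(fun rr => g rr (k - rr)) r] else [] := by
    intro r
    rw [List.filter_map, List.map_map]
    have hc : ((fun x : Int × Int × Char => x.1 + x.2.1 == k) ∘ (fun c => (r, c, g r c))) = fun c : Int => r + c == k := rfl
    rw [hc, pyRange_filter_single C (k - r) _ (by intro c; simp only [beq_iff_eq]; omega) 0]
    by_cases h : 0 ≤ k - r ∧ k - r < C
    · rw [if_pos h, if_pos (show k - C + 1 ≤ r ∧ r < k + 1 by omega)]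
      simp
    · rw [if_neg h, if_neg (show ¬(k - C + 1 ≤ r ∧ r < k + 1) by omega)]
      simp
  simp only [hinner]
  rw [flatMap_if_singleton R (k - C + 1) (k + 1) (fun rr => g rr (k - rr)) 0]

-- the assembled equality on a nonempty board
lemma assembled (x : String) (t : List String)
    (hrow : ∀ s ∈ x :: t, ((x.toList.length : Nat) : Int) ≤ (s.toList.length : Int)) :
    create_all (x :: t) = create_all_alt (x :: t) := by
  have hC : PySem.Str.len ((PySem.List.pyGet? (x :: t) 0).getD "") = ((x.toList.length : Nat) : Int) := by
    rw [PySem.List.pyGet?_zero_cons]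
    simp [PySem.Str.len_eq]
  have hR1 : (1 : Int) ≤ ((x :: t).length : Int) := by simp
  -- elementwise values of `create` for each of the six loop families
  have hd1 : PySem.List.pyGetD [(0 : Int), 1] 0 0 = 0 := by decide
  have hd2 : PySem.List.pyGetD [(0 : Int), 1] 1 0 = 1 := by decide
  have hd3 : PySem.List.pyGetD [(1 : Int), 0] 0 0 = 1 := by decide
  have hd4 : PySem.List.pyGetD [(1 : Int), 0] 1 0 = 0 := by decide
  have hd5 : PySem.List.pyGetD [(1 : Int), 1] 0 0 = 1 := by decide
  have hd6 : PySem.List.pyGetD [(1 : Int), 1] 1 0 = 1 := by decide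
  have hd7 : PySem.List.pyGetD [(1 : Int), -1] 0 0 = 1 := by decide
  have hd8 : PySem.List.pyGetD [(1 : Int), -1] 1 0 = -1 := by decide
  simp only [create_all, create_all_alt, hC]
  simp only [PySem.List.foldl_append_singleton_eq_map, List.nil_append]
  -- split B's diagonal-1 key list and diagonal-2 key list
  rw [List.map_append,
    PySem.List.pyRange_one_append 0 (↑x.toList.length) (↑(x :: t).length + ↑x.toList.length - 1)
      (by omega) (by omega), List.map_append]
  -- separate the two bucket dictionaries
  have hsplit :
      (List.foldl
          (fun (dd : PySem.Dict Int (List Char) × PySem.Dict Int (List Char)) (x : Int × Int × Char) =>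
            (dd.1.modify (x.1 - x.2.1) [] (· ++ [x.2.2]), dd.2.modify (x.1 + x.2.1) [] (· ++ [x.2.2])))
          (PySem.Dict.empty, PySem.Dict.empty)
          (cellsOf ((x :: t).length : Int) (x.toList.length : Int) (fun r c => bCell (x :: t) r c)))
        = ((cellsOf ((x :: t).length : Int) (x.toList.length : Int) (fun r c => bCell (x :: t) r c)).foldl
            (fun d x => d.modify (x.1 - x.2.1) [] (· ++ [x.2.2])) PySem.Dict.empty,
          (cellsOf ((x :: t).length : Int) (x.toList.length : Int) (fun r c => bCell (x :: t) r c)).foldl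
            (fun d x => d.modify (x.1 + x.2.1) [] (· ++ [x.2.2])) PySem.Dict.empty) :=
    PySem.List.foldl_prod_mk
      (fun (d : PySem.Dict Int (List Char)) (x : Int × Int × Char) => d.modify (x.1 - x.2.1) [] (· ++ [x.2.2]))
      (fun (d : PySem.Dict Int (List Char)) (x : Int × Int × Char) => d.modify (x.1 + x.2.1) [] (· ++ [x.2.2]))
      (cellsOf ((x :: t).length : Int) (x.toList.length : Int) (fun r c => bCell (x :: t) r c))
      PySem.Dict.empty PySem.Dict.empty
  rw [show (List.flatMap
        (fun r => List.map (fun c => (r, c, bCell (x :: t) r c)) (PySem.List.pyRange 0 (↑x.toList.length)))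
        (PySem.List.pyRange 0 (↑(x :: t).length)))
      = cellsOf ((x :: t).length : Int) (x.toList.length : Int) (fun r c => bCell (x :: t) r c) from rfl,
    hsplit]
  simp only [bucket1, bucket2]
  simp only [List.append_assoc]
  congr 1
  -- family 1: rows
  · apply List.map_congr_left
    intro i hi
    rw [PySem.List.mem_pyRange_one] at hi
    simp only [create, hC, hd1, hd2]
    exact congrArg String.ofList
      (walk01 (x :: t) (↑x.toList.length) hrow i hi.1 hi.2 ((((x :: t).length : Int)).toNat + (((x.toList.length : Nat) : Int)).toNat + 1) 0 le_rfl (by omega))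
  congr 1
  -- family 2: columns
  · apply List.map_congr_left
    intro i hi
    rw [PySem.List.mem_pyRange_one] at hi
    simp only [create, hC, hd3, hd4]
    exact congrArg String.ofList
      (walk10 (x :: t) (↑x.toList.length) hrow i hi.1 hi.2 ((((x :: t).length : Int)).toNat + (((x.toList.length : Nat) : Int)).toNat + 1) 0 le_rfl (by omega))
  congr 1
  -- family 3: diagonal \ started on the left edge
  · apply List.map_congr_left
    intro i hi
    rw [PySem.List.mem_pyRange_one] at hi
    simp only [create, hC, hd5, hd6]
    rw [show max 0 i = i from by omega]
    have h := walk11 (x :: t) (↑x.toList.length) hrow i ((((x :: t).length : Int)).toNat + (((x.toList.length : Nat) : Int)).toNat + 1) i hi.1 (by omega) (by omega)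
    rw [show i - i = (0 : Int) from by ring] at h
    exact congrArg String.ofList h
  congr 1
  -- family 4: diagonal \ started on the top edge
  · rw [PySem.List.pyRange_one 1 (↑x.toList.length), PySem.List.pyRange_neg_one, List.map_map, List.map_map]
    rw [show (-1 : Int) - -(↑x.toList.length) = ↑x.toList.length - 1 from by ring]
    apply List.map_congr_left
    intro n hn
    rw [List.mem_range] at hn
    simp only [Function.comp]
    simp only [create, hC, hd5, hd6]
    rw [show max 0 (-1 - (n : Int)) = 0 from by omega]
    have h := walk11 (x :: t) (↑x.toList.length) hrow (-1 - (n : Int)) ((((x :: t).length : Int)).toNat + (((x.toList.length : Nat) : Int)).toNat + 1) 0 le_rfl (by omega) (by omega)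
    rw [show (0 : Int) - (-1 - (n : Int)) = 1 + (n : Int) from by ring] at h
    exact congrArg String.ofList h
  congr 1
  -- family 5: diagonal / started on the top edge
  · apply List.map_congr_left
    intro i hi
    rw [PySem.List.mem_pyRange_one] at hi
    simp only [create, hC, hd7, hd8]
    rw [show max 0 (i - ↑x.toList.length + 1) = 0 from by omega]
    have h := walk1m1 (x :: t) (↑x.toList.length) hrow i ((((x :: t).length : Int)).toNat + (((x.toList.length : Nat) : Int)).toNat + 1) 0 le_rfl (by omega) (by omega)
    rw [show i - (0 : Int) = i from by ring] at h
    exact congrArg String.ofList h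
  -- family 6: diagonal / started on the right edge
  · rw [PySem.List.pyRange_one 1 (↑(x :: t).length),
      PySem.List.pyRange_one (↑x.toList.length) (↑(x :: t).length + ↑x.toList.length - 1),
      List.map_map, List.map_map]
    rw [show (↑(x :: t).length + ↑x.toList.length - 1 : Int) - ↑x.toList.length = ↑(x :: t).length - 1 from by ring]
    apply List.map_congr_left
    intro n hn
    rw [List.mem_range] at hn
    simp only [Function.comp]
    simp only [create, hC, hd7, hd8]
    rw [show max 0 (↑x.toList.length + (n : Int) - ↑x.toList.length + 1) = 1 + (n : Int) from by omega]
    have h := walk1m1 (x :: t) (↑x.toList.length) hrow (↑x.toList.length + (n : Int)) ((((x :: t).length : Int)).toNat + (((x.toList.length : Nat) : Int)).toNat + 1) (1 + (n : Int))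
      (by omega) (by omega) (by omega)
    rw [show (↑x.toList.length + (n : Int)) - (1 + (n : Int)) = ↑x.toList.length - 1 from by ring] at h
    exact congrArg String.ofList h

-- ===== VERDICT (by name: the statement is the Claim_ definition above) =====
theorem create_all_spec : Claim_equal_create_all := by
  intro board hDom hPre
  unfold Spec_create_all
  obtain ⟨hne, hlen⟩ := hPre
  cases board with
  | nil => exact absurd rfl hne
  | cons x t =>
    refine assembled x t ?_
    intro s hs
    have h := hlen s hs
    rw [List.headD_cons] at h
    have hx : PySem.Str.len x = ((x.toList.length : Nat) : Int) := by simp [PySem.Str.len_eq]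
    have hsx : PySem.Str.len s = ((s.toList.length : Nat) : Int) := by simp [PySem.Str.len_eq]
    rw [hx, hsx] at h
    exact h
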